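-- pv_equiv track=rewrite | github.com/YavuzBozkurt/HackerRank | Dynamic Monke/angry children 2/angry2.py | angryDP
-- ===== SOURCE A (Python) =====
-- def angryDP(k, packets, U):
--     packets = sorted(packets)
--     given = []
--     # base case
--     U[0] = 0
--     # add it to given list to measure for unfairness later
--     given.append(packets[0])
--     # delete it from packets list so that this packet is not given again
--     del packets[0]
--
--     for i in range(1, k):
--         # calculate unfairness magnitude via recursive formula
--         U[i] = U[i - 1] + sum([abs(packets[0] - given[j]) for j in range(len(given))])
--         # add it to given list to measure for unfairness later
--         given.append(packets[0])
--         # delete it from packets list so that this packet is not given again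
--         del packets[0]
--     # return the solution
--     return U[k - 1]
-- ===== SOURCE B (Python) =====
-- # Same contract as A (fills the scratch table U in place, returns U[k-1]) but each
-- # step is O(1): the inner rescan of all already-given packets is replaced by a running
-- # prefix sum, using U[i] = U[i-1] + i*xs[i] - (xs[0]+...+xs[i-1]) on the sorted list.
-- def angryDP(k, packets, U):
--     xs = sorted(packets)
--     U[0] = 0
--     prefix = xs[0]
--     for i in range(1, k):
--         U[i] = U[i - 1] + i * xs[i] - prefix
--         prefix += xs[i]
--     return U[k - 1]
-- ===== Notes on version B (the rewrite author's own statement) =====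
-- stated objective: faster
-- what changed: Each DP step's inner rescan of all already-given packets (a fresh sum of absolute differences per iteration, plus the 'given' list and repeated del packets[0]) is replaced by a single running prefix-sum accumulator on the sorted list, U[i] = U[i-1] + i*xs[i] - prefix.
import Mathlib
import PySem

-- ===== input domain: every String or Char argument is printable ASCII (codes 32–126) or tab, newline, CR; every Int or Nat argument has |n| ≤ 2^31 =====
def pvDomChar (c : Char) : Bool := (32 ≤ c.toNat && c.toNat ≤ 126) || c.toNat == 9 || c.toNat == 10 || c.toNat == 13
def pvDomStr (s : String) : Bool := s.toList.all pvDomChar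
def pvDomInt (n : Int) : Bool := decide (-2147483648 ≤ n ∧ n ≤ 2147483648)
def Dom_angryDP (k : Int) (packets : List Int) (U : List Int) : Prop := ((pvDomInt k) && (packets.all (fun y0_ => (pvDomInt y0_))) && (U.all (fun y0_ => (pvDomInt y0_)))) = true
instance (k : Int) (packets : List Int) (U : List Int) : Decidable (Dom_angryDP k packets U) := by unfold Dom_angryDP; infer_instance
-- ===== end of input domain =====

-- B replaces A's quadratic per-step rescan of the already-given packets by an O(1)
-- running prefix-sum update per step. Both Pythons mutate the scratch table U in place
-- (with the same values); the equivalence proved here is about the return value.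

-- ===== PORT A =====
def angryDP (k : Int) (packets : List Int) (U : List Int) : Int :=
  let s := PySem.List.sorted packets id false     -- packets = sorted(packets)
  let U1 := PySem.List.pySetD U 0 0              -- U[0] = 0
  let given : List Int := [PySem.List.pyGetD s 0 0]  -- given.append(packets[0])
  let s1 := s.drop 1                              -- del packets[0]
  let st := (PySem.List.pyRange 1 k 1).foldl
    (fun (st : List Int × List Int × List Int) i =>
      let Uc := st.1
      let gv := st.2.1
      let pk := st.2.2
      let p0 := PySem.List.pyGetD pk 0 0
      let v := PySem.List.pyGetD Uc (i - 1) 0 +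
        ((PySem.List.pyRange 0 (gv.length : Int) 1).map
          (fun j => |p0 - PySem.List.pyGetD gv j 0|)).sum
      (PySem.List.pySetD Uc i v, gv ++ [p0], pk.drop 1))
    (U1, given, s1)
  PySem.List.pyGetD st.1 (k - 1) 0

-- ===== PORT B =====
def angryDP_alt (k : Int) (packets : List Int) (U : List Int) : Int :=
  let xs := PySem.List.sorted packets id false    -- xs = sorted(packets)
  let U1 := PySem.List.pySetD U 0 0               -- U[0] = 0
  let pfx0 := PySem.List.pyGetD xs 0 0            -- prefix = xs[0]
  let st := (PySem.List.pyRange 1 k 1).foldl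
    (fun (st : List Int × Int) i =>
      let v := PySem.List.pyGetD st.1 (i - 1) 0 + i * PySem.List.pyGetD xs i 0 - st.2
      (PySem.List.pySetD st.1 i v, st.2 + PySem.List.pyGetD xs i 0))
    (U1, pfx0)
  PySem.List.pyGetD st.1 (k - 1) 0

-- ===== PRECONDITION & SPEC =====
-- Pre_ is exactly where the Python A returns (elsewhere it raises IndexError): either
-- 1 <= k with enough packets and enough cells in U, or k <= 0, where the loop body never
-- runs and A returns U[k-1] by Python's negative indexing (needing both lists nonempty
-- and k-1 >= -len(U)).
def Pre_angryDP (k : Int) (packets : List Int) (U : List Int) : Prop :=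
  (1 ≤ k ∧ k ≤ packets.length ∧ k ≤ U.length) ∨
  (k ≤ 0 ∧ 1 ≤ packets.length ∧ 1 ≤ U.length ∧ 1 - (U.length : Int) ≤ k)
instance (k : Int) (packets : List Int) (U : List Int) : Decidable (Pre_angryDP k packets U) := by
  unfold Pre_angryDP; infer_instance
def pvWitness_angryDP : Int × List Int × List Int := (2, [3, 1, 7], [5, 5])
def Spec_angryDP (k : Int) (packets : List Int) (U : List Int) (out : Int) : Prop := out = angryDP_alt k packets U
instance (k : Int) (packets : List Int) (U : List Int) (out : Int) : Decidable (Spec_angryDP k packets U out) := by unfold Spec_angryDP; infer_instance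

-- ===== CLAIM (what is proved, stated in full; the proofs are below) =====
def Claim_equal_angryDP : Prop := ∀ (k : Int) (packets : List Int) (U : List Int), Dom_angryDP k packets U → Pre_angryDP k packets U → Spec_angryDP k packets U (angryDP k packets U)

-- ===== LEMMAS AND PROOFS =====

-- U[m] as computed by A's recurrence on the sorted list s.
def valA (s : List Int) : ℕ → Int
  | 0 => 0
  | n + 1 => valA s n + ((s.take (n + 1)).map (fun g => |s.getD (n + 1) 0 - g|)).sum

theorem sum_map_const_sub (c : Int) (l : List Int) :
    (l.map (fun g => c - g)).sum = l.length * c - l.sum := by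
  induction l with
  | nil => simp
  | cons x xs ih => simp [ih]; ring

theorem mem_take_le (s : List Int) (hs : s.Pairwise (· ≤ ·)) (n : ℕ) (hn : n < s.length)
    (g : Int) (hg : g ∈ s.take n) : g ≤ s.getD n 0 := by
  rw [List.mem_take_iff_getElem] at hg
  obtain ⟨j, hj, rfl⟩ := hg
  rw [List.getD_eq_getElem s 0 hn]
  exact (List.pairwise_iff_getElem.mp hs) j n _ hn (by omega)

theorem abs_sum_sorted (s : List Int) (hs : s.Pairwise (· ≤ ·)) (n : ℕ) (hn : n < s.length) :
    ((s.take n).map (fun g => |s.getD n 0 - g|)).sum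
      = (n : Int) * s.getD n 0 - (s.take n).sum := by
  have h1 : (s.take n).map (fun g => |s.getD n 0 - g|)
      = (s.take n).map (fun g => s.getD n 0 - g) := by
    apply List.map_congr_left
    intro g hg
    exact abs_of_nonneg (sub_nonneg.mpr (mem_take_le s hs n hn g hg))
  rw [h1, sum_map_const_sub]
  have : (s.take n).length = n := by
    simp [List.length_take]; omega
  rw [this]

-- the map-sum in A's port over indices equals the map-sum over the list itself
theorem range_abs_sum (p0 : Int) (gv : List Int) :
    ((PySem.List.pyRange 0 (gv.length : Int) 1).map
      (fun j => |p0 - PySem.List.pyGetD gv j 0|)).sum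
      = (gv.map (fun g => |p0 - g|)).sum := by
  have h : (PySem.List.pyRange 0 (gv.length : Int) 1).map
      (fun j => |p0 - PySem.List.pyGetD gv j 0|)
      = ((PySem.List.pyRange 0 (gv.length : Int) 1).map
          (fun j => PySem.List.pyGetD gv j 0)).map (fun g => |p0 - g|) := by
    simp [List.map_map, Function.comp]
  rw [h, PySem.List.map_pyGetD_pyRange_zero']

-- A's loop invariant: after iterations 1..n-1, given = s.take n, packets = s.drop n,
-- and the table holds valA s (n-1) at index n-1.
theorem loopA_inv (s U0 : List Int) (n : ℕ) (h1 : 1 ≤ n) (hns : n ≤ s.length)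
    (hnu : n ≤ U0.length) :
    ∃ W : List Int,
      (PySem.List.pyRange 1 (n : Int) 1).foldl
        (fun (st : List Int × List Int × List Int) i =>
          let Uc := st.1
          let gv := st.2.1
          let pk := st.2.2
          let p0 := PySem.List.pyGetD pk 0 0
          let v := PySem.List.pyGetD Uc (i - 1) 0 +
            ((PySem.List.pyRange 0 (gv.length : Int) 1).map
              (fun j => |p0 - PySem.List.pyGetD gv j 0|)).sum
          (PySem.List.pySetD Uc i v, gv ++ [p0], pk.drop 1))
        (PySem.List.pySetD U0 0 0, [PySem.List.pyGetD s 0 0], s.drop 1)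
      = (W, s.take n, s.drop n)
      ∧ W.length = U0.length
      ∧ PySem.List.pyGetD W ((n : Int) - 1) 0 = valA s (n - 1) := by
  induction n, h1 using Nat.le_induction with
  | base =>
    refine ⟨PySem.List.pySetD U0 0 0, ?_, ?_, ?_⟩
    · rw [PySem.List.pyRange_one_eq_nil (by norm_num)]
      simp only [List.foldl_nil]
      have h0 : (0 : ℕ) < s.length := by omega
      rw [List.take_add_one, List.getElem?_eq_getElem h0]
      simp [PySem.List.pyGetD_zero, List.getD_eq_getElem?_getD, List.getElem?_eq_getElem h0]
    · simp [PySem.List.pySetD_of_nonneg]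
    · have h0 : (0 : ℕ) < U0.length := by omega
      have h0' : (0 : ℕ) < (U0.set 0 0).length := by simpa using h0
      norm_num [valA, PySem.List.pySetD_of_nonneg, PySem.List.pyGetD_zero,
        List.getD_eq_getElem?_getD, List.getElem?_eq_getElem h0', List.getElem_set_self]
  | succ n hn1 ih =>
    obtain ⟨W, heq, hlen, hget⟩ := ih (by omega) (by omega)
    have hns' : n < s.length := by omega
    have hnu' : n < U0.length := by omega
    have hrange : PySem.List.pyRange 1 ((n + 1 : ℕ) : Int) 1
        = PySem.List.pyRange 1 (n : Int) 1 ++ [(n : Int)] := by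
      push_cast
      exact PySem.List.pyRange_one_succ_right (by exact_mod_cast hn1)
    rw [hrange, List.foldl_append, heq]
    refine ⟨PySem.List.pySetD W (n : Int)
      (valA s n), ?_, ?_, ?_⟩
    · simp only [List.foldl_cons, List.foldl_nil]
      have hp0 : PySem.List.pyGetD (s.drop n) 0 0 = s.getD n 0 := by
        rw [PySem.List.pyGetD_zero, List.getD_eq_getElem?_getD, List.getD_eq_getElem?_getD,
          List.getElem?_drop, Nat.add_zero]
      have hprev : ((n : Int) - 1) = ((n - 1 : ℕ) : Int) := by omega
      have hv : valA s (n - 1) + ((s.take n).map (fun g => |s.getD n 0 - g|)).sum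
          = valA s n := by
        obtain ⟨m, rfl⟩ : ∃ m, n = m + 1 := ⟨n - 1, by omega⟩
        simp [valA]
      refine Prod.ext ?_ (Prod.ext ?_ ?_) <;>
        simp only [hp0, range_abs_sum, hprev]
      · rw [← hprev, hget, hv]
      · rw [List.take_add_one, List.getElem?_eq_getElem hns',
          List.getD_eq_getElem s 0 hns']
        simp
      · simp [List.drop_drop]
    · simp [hlen]
    · have : (((n + 1 : ℕ) : Int) - 1) = ((n : ℕ) : Int) := by push_cast; ring
      rw [this, PySem.List.pyGetD_natCast]
      rw [List.getD_eq_getElem _ 0 (by simp [PySem.List.pySetD_of_nonneg]; omega)]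
      simp [PySem.List.pySetD_of_nonneg, List.getElem_set_self]

theorem valA_step (s : List Int) (hs : s.Pairwise (· ≤ ·)) (n : ℕ) (hn : n < s.length) :
    valA s n = valA s (n - 1) + (n : Int) * s.getD n 0 - (s.take n).sum := by
  cases n with
  | zero => simp [valA]
  | succ m =>
    show valA s (m + 1) = _
    rw [valA, abs_sum_sorted s hs (m + 1) hn]
    simp
    ring

-- B's loop invariant: after iterations 1..n-1 the accumulator holds (s.take n).sum and
-- the table holds valA s (n-1) at index n-1.
theorem loopB2_inv (s U0 : List Int) (hs : s.Pairwise (· ≤ ·)) (n : ℕ) (h1 : 1 ≤ n)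
    (hns : n ≤ s.length) (hnu : n ≤ U0.length) :
    ∃ W : List Int,
      (PySem.List.pyRange 1 (n : Int) 1).foldl
        (fun (st : List Int × Int) i =>
          let v := PySem.List.pyGetD st.1 (i - 1) 0 + i * PySem.List.pyGetD s i 0 - st.2
          (PySem.List.pySetD st.1 i v, st.2 + PySem.List.pyGetD s i 0))
        (PySem.List.pySetD U0 0 0, PySem.List.pyGetD s 0 0)
      = (W, (s.take n).sum)
      ∧ W.length = U0.length
      ∧ PySem.List.pyGetD W ((n : Int) - 1) 0 = valA s (n - 1) := by
  induction n, h1 using Nat.le_induction with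
  | base =>
    have h0s : (0 : ℕ) < s.length := by omega
    have h0 : (0 : ℕ) < U0.length := by omega
    have h0' : (0 : ℕ) < (U0.set 0 0).length := by simpa using h0
    refine ⟨PySem.List.pySetD U0 0 0, ?_, ?_, ?_⟩
    · rw [PySem.List.pyRange_one_eq_nil (by norm_num)]
      simp only [List.foldl_nil]
      rw [List.take_add_one, List.getElem?_eq_getElem h0s]
      simp [PySem.List.pyGetD_zero, List.getD_eq_getElem?_getD, List.getElem?_eq_getElem h0s]
    · simp [PySem.List.pySetD_of_nonneg]
    · norm_num [valA, PySem.List.pySetD_of_nonneg, PySem.List.pyGetD_zero,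
        List.getD_eq_getElem?_getD, List.getElem?_eq_getElem h0', List.getElem_set_self]
  | succ n hn1 ih =>
    obtain ⟨W, heq, hlen, hget⟩ := ih (by omega) (by omega)
    have hns' : n < s.length := by omega
    have hnu' : n < U0.length := by omega
    have hrange : PySem.List.pyRange 1 ((n + 1 : ℕ) : Int) 1
        = PySem.List.pyRange 1 (n : Int) 1 ++ [(n : Int)] := by
      push_cast
      exact PySem.List.pyRange_one_succ_right (by exact_mod_cast hn1)
    rw [hrange, List.foldl_append, heq]
    have hsn : PySem.List.pyGetD s ((n : ℕ) : Int) 0 = s.getD n 0 :=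
      PySem.List.pyGetD_natCast ..
    have hprev : ((n : Int) - 1) = ((n - 1 : ℕ) : Int) := by omega
    refine ⟨PySem.List.pySetD W (n : Int) (valA s n), ?_, ?_, ?_⟩
    · simp only [List.foldl_cons, List.foldl_nil]
      refine Prod.ext ?_ ?_
      · simp only [hsn, hprev, hget]
        rw [← hprev, hget, valA_step s hs n hns']
      · simp only [hsn, List.getD_eq_getElem s 0 hns']
        exact (List.sum_take_succ s n hns').symm
    · simp [hlen]
    · have : (((n + 1 : ℕ) : Int) - 1) = ((n : ℕ) : Int) := by push_cast; ring
      rw [this, PySem.List.pyGetD_natCast]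
      rw [List.getD_eq_getElem _ 0 (by simp [PySem.List.pySetD_of_nonneg]; omega)]
      simp [PySem.List.pySetD_of_nonneg, List.getElem_set_self]

-- ===== VERDICT (by name: the statement is the Claim_ definition above) =====
theorem angryDP_spec : Claim_equal_angryDP := by
  intro k packets U _ hpre
  unfold Spec_angryDP
  by_cases hk0 : k ≤ 0
  · -- both loops are empty: both return U[k-1] of the table after U[0] = 0
    have : PySem.List.pyRange 1 k 1 = [] := PySem.List.pyRange_one_eq_nil (by omega)
    simp only [angryDP, angryDP_alt, this, List.foldl_nil]
  · have hk1 : 1 ≤ k := by omega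
    have hkp : k ≤ packets.length := by
      rcases hpre with ⟨_, h, _⟩ | ⟨h, _⟩ <;> omega
    have hku : k ≤ U.length := by
      rcases hpre with ⟨_, _, h⟩ | ⟨h, _⟩ <;> omega
    have hk : ((k.toNat : ℕ) : Int) = k := Int.toNat_of_nonneg (by omega)
    have hn1 : 1 ≤ k.toNat := by omega
    have hs : (PySem.List.sorted packets id false).Pairwise (· ≤ ·) := by
      simpa using PySem.List.sorted_pairwise (xs := packets) (key := id)
    have hslen : (PySem.List.sorted packets id false).length = packets.length :=
      PySem.List.length_sorted ..
    obtain ⟨W, heq, hWlen, hget⟩ :=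
      loopA_inv (PySem.List.sorted packets id false) U k.toNat hn1 (by omega) (by omega)
    obtain ⟨W', heq', hWlen', hget'⟩ :=
      loopB2_inv (PySem.List.sorted packets id false) U hs k.toNat hn1 (by omega) (by omega)
    rw [hk] at heq hget heq' hget'
    have hA : angryDP k packets U = valA (PySem.List.sorted packets id false) (k.toNat - 1) := by
      simp only [angryDP]
      rw [heq]
      exact hget
    have hB : angryDP_alt k packets U = valA (PySem.List.sorted packets id false) (k.toNat - 1) := by
      simp only [angryDP_alt]
      rw [heq']
      exact hget'
    rw [hA, hB]
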